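-- pv_equiv track=rewrite | github.com/theclepro1-hub/Jarvis.AI | jarvis_ai/environment_doctor.py | render_doctor_report
-- ===== SOURCE A (Python) =====
-- from typing import Dict, List
--
-- def doctor_summary(items: List[Dict[str, str]]) -> str:
--     error_count = sum(1 for item in items if item.get("status") == "error")
--     warn_count = sum(1 for item in items if item.get("status") == "warn")
--     ok_count = sum(1 for item in items if item.get("status") == "ok")
--     return f"Проверка среды: ок {ok_count} • предупреждений {warn_count} • ошибок {error_count}"
--
-- def render_doctor_report(items: List[Dict[str, str]]) -> str:
--     rows = [doctor_summary(items), ""]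
--     for index, item in enumerate(items, 1):
--         status = str(item.get("status") or "info").upper()
--         rows.append(f"{index}. [{status}] {item.get('title', '')}")
--         rows.append(str(item.get("detail", "")).strip())
--         fix = str(item.get("fix", "")).strip()
--         if fix:
--             rows.append("Что сделать: " + fix)
--         rows.append("")
--     return "\n".join(rows).strip()
-- ===== SOURCE B (Python) =====
-- def render_doctor_report(items):
--     ok = warn = err = 0
--     lines = []
--     index = 0
--     for item in items:
--         index += 1
--         status = item.get("status")
--         if status == "ok":
--             ok += 1
--         elif status == "warn":
--             warn += 1
--         elif status == "error":
--             err += 1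
--         shown = str(status or "info").upper()
--         lines.append(f"{index}. [{shown}] {item.get('title', '')}")
--         lines.append(str(item.get("detail", "")).strip())
--         fix = str(item.get("fix", "")).strip()
--         if fix:
--             lines.append("Что сделать: " + fix)
--         lines.append("")
--     header = f"Проверка среды: ок {ok} • предупреждений {warn} • ошибок {err}"
--     return "\n".join([header, ""] + lines).strip()
-- ===== Notes on version B (the rewrite author's own statement) =====
-- stated objective: simpler
-- what changed: Replaces doctor_summary's three separate scans over the items with a single pass that counts ok/warn/error statuses while rendering each item's block, then emits the identical header and joined report.
import Mathlib
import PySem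

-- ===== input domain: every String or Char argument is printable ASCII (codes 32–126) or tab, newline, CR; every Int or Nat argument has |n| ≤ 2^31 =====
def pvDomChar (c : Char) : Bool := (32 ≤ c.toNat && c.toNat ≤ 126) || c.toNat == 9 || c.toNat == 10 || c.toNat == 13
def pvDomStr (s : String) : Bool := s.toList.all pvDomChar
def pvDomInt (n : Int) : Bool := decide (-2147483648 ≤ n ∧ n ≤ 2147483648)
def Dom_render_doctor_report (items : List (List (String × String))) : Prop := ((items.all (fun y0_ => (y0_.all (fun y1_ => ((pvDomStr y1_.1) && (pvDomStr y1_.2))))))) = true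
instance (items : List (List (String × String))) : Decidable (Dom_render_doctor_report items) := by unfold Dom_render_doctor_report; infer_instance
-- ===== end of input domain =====

-- B is a one-pass rewrite: the three status-counting scans of doctor_summary are fused into the render loop.

-- ===== PORT A =====
-- item.get(k): first-match lookup in the association list (dict under the type convention)
def pyGetItem (item : List (String × String)) (k : String) : Option String :=
  (item.find? (fun p => p.1 == k)).map (·.2)

-- sum(1 for item in items if item.get("status") == s), as the generator-sum loop
def statusCountLoop (s : String) (items : List (List (String × String))) : Int :=
  items.foldl (fun a item => if pyGetItem item "status" == some s then a + 1 else a) 0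

def doctor_summary (items : List (List (String × String))) : String :=
  let error_count := statusCountLoop "error" items
  let warn_count := statusCountLoop "warn" items
  let ok_count := statusCountLoop "ok" items
  "Проверка среды: ок " ++ PySem.Int.toStr ok_count ++ " • предупреждений " ++
    PySem.Int.toStr warn_count ++ " • ошибок " ++ PySem.Int.toStr error_count

-- one iteration of A's for-loop body (state = (rows, index of the NEXT item))
def stepA (st : List String × Int) (item : List (String × String)) : List String × Int :=
  let rows := st.1
  let index := st.2
  let raw := (pyGetItem item "status").getD ""        -- item.get("status") or "info" (None/"" are falsy)
  let status := PySem.Str.upper (if raw == "" then "info" else raw)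
  let rows := rows ++ [PySem.Int.toStr index ++ ". [" ++ status ++ "] " ++ (pyGetItem item "title").getD ""]
  let rows := rows ++ [PySem.Str.strip ((pyGetItem item "detail").getD "")]
  let fix := PySem.Str.strip ((pyGetItem item "fix").getD "")
  let rows := if fix == "" then rows else rows ++ ["Что сделать: " ++ fix]
  (rows ++ [""], index + 1)

def render_doctor_report (items : List (List (String × String))) : String :=
  let rows := [doctor_summary items, ""]
  let rows := (items.foldl stepA (rows, 1)).1
  PySem.Str.strip (PySem.Str.join "\n" rows)

-- ===== PORT B =====
-- one iteration of B's fused loop (state = (ok, warn, err, lines, index))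
def stepB (st : Int × Int × Int × List String × Int) (item : List (String × String)) :
    Int × Int × Int × List String × Int :=
  let (ok, warn, err, lines, index) := st
  let index := index + 1
  let status := pyGetItem item "status"
  let (ok, warn, err) :=
    if status == some "ok" then (ok + 1, warn, err)
    else if status == some "warn" then (ok, warn + 1, err)
    else if status == some "error" then (ok, warn, err + 1)
    else (ok, warn, err)
  let raw := status.getD ""
  let shown := PySem.Str.upper (if raw == "" then "info" else raw)
  let lines := lines ++ [PySem.Int.toStr index ++ ". [" ++ shown ++ "] " ++ (pyGetItem item "title").getD ""]
  let lines := lines ++ [PySem.Str.strip ((pyGetItem item "detail").getD "")]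
  let fix := PySem.Str.strip ((pyGetItem item "fix").getD "")
  let lines := if fix == "" then lines else lines ++ ["Что сделать: " ++ fix]
  (ok, warn, err, lines ++ [""], index)

def render_doctor_report_alt (items : List (List (String × String))) : String :=
  let (ok, warn, err, lines, _) := items.foldl stepB (0, 0, 0, [], 0)
  let header := "Проверка среды: ок " ++ PySem.Int.toStr ok ++ " • предупреждений " ++
    PySem.Int.toStr warn ++ " • ошибок " ++ PySem.Int.toStr err
  PySem.Str.strip (PySem.Str.join "\n" ([header, ""] ++ lines))

-- ===== PRECONDITION & SPEC =====
def Spec_render_doctor_report (items : List (List (String × String))) (out : String) : Prop := out = render_doctor_report_alt items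
instance (items : List (List (String × String))) (out : String) : Decidable (Spec_render_doctor_report items out) := by unfold Spec_render_doctor_report; infer_instance

-- ===== CLAIM (what is proved, stated in full; the proofs are below) =====
def Claim_equal_render_doctor_report : Prop := ∀ (items : List (List (String × String))), Dom_render_doctor_report items → Spec_render_doctor_report items (render_doctor_report items)

-- ===== LEMMAS AND PROOFS =====

-- the per-item lines both loops append, and their concatenation from a given index
def itemLines (item : List (String × String)) (index : Int) : List String :=
  let raw := (pyGetItem item "status").getD ""
  let shown := PySem.Str.upper (if raw == "" then "info" else raw)
  let fix := PySem.Str.strip ((pyGetItem item "fix").getD "")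
  [PySem.Int.toStr index ++ ". [" ++ shown ++ "] " ++ (pyGetItem item "title").getD "",
   PySem.Str.strip ((pyGetItem item "detail").getD "")] ++
  (if fix == "" then [] else ["Что сделать: " ++ fix]) ++ [""]

def bodyLines : List (List (String × String)) → Int → List String
  | [], _ => []
  | item :: rest, index => itemLines item index ++ bodyLines rest (index + 1)

-- recursive count of a given status
def cnt (s : String) : List (List (String × String)) → Int
  | [] => 0
  | item :: rest => (if pyGetItem item "status" == some s then 1 else 0) + cnt s rest

lemma statusCount_foldl (s : String) (items : List (List (String × String))) :
    ∀ a : Int, items.foldl (fun a item => if pyGetItem item "status" == some s then a + 1 else a) a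
      = a + cnt s items := by
  induction items with
  | nil => intro a; simp [cnt]
  | cons item rest ih =>
    intro a
    simp only [List.foldl_cons, cnt, ih]
    split <;> ring

lemma statusCountLoop_eq (s : String) (items : List (List (String × String))) :
    statusCountLoop s items = cnt s items := by
  rw [statusCountLoop, statusCount_foldl]; ring

lemma stepA_rows (st : List String × Int) (item : List (String × String)) :
    stepA st item = (st.1 ++ itemLines item st.2, st.2 + 1) := by
  simp only [stepA, itemLines]
  split <;> simp

lemma foldA (items : List (List (String × String))) :
    ∀ (rows : List String) (index : Int),
      items.foldl stepA (rows, index) = (rows ++ bodyLines items index, index + items.length) := by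
  induction items with
  | nil => intro rows index; simp [bodyLines]
  | cons item rest ih =>
    intro rows index
    simp only [List.foldl_cons, stepA_rows, ih, bodyLines, List.append_assoc, List.length_cons,
      Prod.mk.injEq]
    exact ⟨trivial, by push_cast; ring⟩

lemma stepB_eq (st : Int × Int × Int × List String × Int) (item : List (String × String)) :
    stepB st item =
      (st.1 + (if pyGetItem item "status" == some "ok" then 1 else 0),
       st.2.1 + (if pyGetItem item "status" == some "warn" then 1 else 0),
       st.2.2.1 + (if pyGetItem item "status" == some "error" then 1 else 0),
       st.2.2.2.1 ++ itemLines item (st.2.2.2.2 + 1),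
       st.2.2.2.2 + 1) := by
  obtain ⟨ok, warn, err, lines, index⟩ := st
  simp only [stepB, itemLines]
  by_cases h1 : pyGetItem item "status" == some "ok"
  · have : pyGetItem item "status" = some "ok" := by simpa using h1
    simp [this]
    split <;> simp
  · by_cases h2 : pyGetItem item "status" == some "warn"
    · have : pyGetItem item "status" = some "warn" := by simpa using h2
      simp [this]
      split <;> simp
    · by_cases h3 : pyGetItem item "status" == some "error"
      · have : pyGetItem item "status" = some "error" := by simpa using h3
        simp [this]
        split <;> simp
      · simp [h1, h2, h3]
        split <;> simp

lemma foldB (items : List (List (String × String))) :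
    ∀ (ok warn err : Int) (lines : List String) (index : Int),
      items.foldl stepB (ok, warn, err, lines, index) =
        (ok + cnt "ok" items, warn + cnt "warn" items, err + cnt "error" items,
         lines ++ bodyLines items (index + 1), index + items.length) := by
  induction items with
  | nil => intro ok warn err lines index; simp [cnt, bodyLines]
  | cons item rest ih =>
    intro ok warn err lines index
    simp only [List.foldl_cons, stepB_eq, ih, cnt, bodyLines, List.append_assoc, List.length_cons,
      Prod.mk.injEq]
    refine ⟨by ring, by ring, by ring, by norm_num, by push_cast; ring⟩

-- ===== VERDICT (by name: the statement is the Claim_ definition above) =====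
theorem render_doctor_report_spec : Claim_equal_render_doctor_report := by
  intro items _
  show render_doctor_report items = render_doctor_report_alt items
  simp only [render_doctor_report, render_doctor_report_alt, doctor_summary,
    statusCountLoop_eq, foldA, foldB]
  norm_num
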